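-- pv_equiv track=rewrite | github.com/ncusi/PatchScope | src/diffannotator/annotate.py | front_fill_gaps
-- ===== SOURCE A (Python) =====
-- from typing import TypeVar, Optional, Union, Literal, TYPE_CHECKING
--
-- T = TypeVar('T')
--
-- def front_fill_gaps(data: dict[int, T]) -> dict[int, T]:
--     """Fill any gaps in `data` keys with the previous value
--
--     >>> front_fill_gaps({1: '1', 3: '3'})
--     {1: '1', 2: '1', 3: '3'}
--
--     Parameters
--     ----------
--     data
--         Input data - dictionary with int keys
--
--     Returns
--     -------
--     dict
--         Front filled input data
--     """
--     if not data:
--         return {}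
--
--     # Find the minimum and maximum keys
--     min_key = min(data.keys())
--     max_key = max(data.keys())
--
--     # Create a new dictionary to store the result
--     filled_dict = {}
--
--     # Initialize the previous value
--     previous_value = None
--
--     # Iterate through the range of keys
--     for key in range(min_key, max_key + 1):
--         if key in data:
--             previous_value = data[key]
--         filled_dict[key] = previous_value
--
--     return filled_dict
-- ===== SOURCE B (Python) =====
-- def front_fill_gaps(data):
--     """Fill gaps in int-keyed dict keys with the previous value.
--
--     Sort the present entries once by key, then for each pair of consecutive
--     present keys fill the segment [k, next_key) with k's value; the last
--     present key maps to its own value.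
--     """
--     items = sorted(data.items(), key=lambda kv: kv[0])
--     result = {}
--     for (k, v), (nk, _) in zip(items, items[1:]):
--         for j in range(k, nk):
--             result[j] = v
--     if items:
--         k, v = items[-1]
--         result[k] = v
--     return result
-- ===== Notes on version B (the rewrite author's own statement) =====
-- stated objective: alternative
-- what changed: B sorts the dict's entries once by key and fills each gap segment between consecutive present keys directly, instead of A's scan over every integer in [min_key, max_key] with a per-key dict membership test and lookup.
import Mathlib
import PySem

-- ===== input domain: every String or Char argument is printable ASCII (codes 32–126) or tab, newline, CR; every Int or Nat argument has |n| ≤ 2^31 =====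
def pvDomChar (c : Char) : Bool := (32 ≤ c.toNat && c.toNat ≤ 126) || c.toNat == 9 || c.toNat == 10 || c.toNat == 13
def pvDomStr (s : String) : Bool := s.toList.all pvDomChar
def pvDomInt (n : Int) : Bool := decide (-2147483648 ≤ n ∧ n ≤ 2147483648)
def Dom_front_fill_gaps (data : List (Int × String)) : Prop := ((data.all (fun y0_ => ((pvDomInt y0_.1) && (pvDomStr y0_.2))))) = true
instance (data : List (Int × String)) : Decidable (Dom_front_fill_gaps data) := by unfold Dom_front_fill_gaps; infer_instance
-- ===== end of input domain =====

-- B sorts the dict's entries once and fills each gap segment between consecutive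
-- present keys, instead of A's scan of every integer in [min_key, max_key] with a
-- per-key membership test (objective: alternative algorithm, same cost).
-- The association list stands for a Python dict, so both ports read it via
-- PySem.Dict.ofList (dict(pairs): last value per key wins, first position kept).

-- ===== PORT A =====
def front_fill_gaps (data : List (Int × String)) : List (Int × String) :=
  let d := PySem.Dict.ofList data
  if d.items = [] then []
  else
    -- d is nonempty here, so min?/max? are `some` and the .getD 0 default is never used
    let min_key := (PySem.List.min? d.keys (fun x => x)).getD 0
    let max_key := (PySem.List.max? d.keys (fun x => x)).getD 0
    -- filled_dict kept as its items list: every inserted key is fresh (the range is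
    -- strictly ascending), so Python's dict assignment appends.  previous_value is
    -- Option String; it is `some` from the first iteration on (min_key ∈ d), so the
    -- .getD "" default is never used.
    ((PySem.List.pyRange min_key (max_key + 1) 1).foldl
      (fun (st : Option String × List (Int × String)) key =>
        let prev := if d.contains key then d.get? key else st.1
        (prev, st.2 ++ [(key, prev.getD "")]))
      (none, [])).2

-- ===== PORT B =====
def front_fill_gaps_alt (data : List (Int × String)) : List (Int × String) :=
  let items := PySem.List.sorted (PySem.Dict.ofList data).items (fun kv => kv.1) false
  -- result kept as its items list: inserted keys are strictly ascending, hence fresh,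
  -- so Python's dict assignment appends (incl. the final last-key assignment)
  let result := (items.zip (items.drop 1)).foldl
    (fun (acc : List (Int × String)) pq =>
      (PySem.List.pyRange pq.1.1 pq.2.1 1).foldl (fun a j => a ++ [(j, pq.1.2)]) acc)
    []
  match items.getLast? with
  | none => result
  | some kv => result ++ [kv]

-- ===== PRECONDITION & SPEC =====
def Spec_front_fill_gaps (data : List (Int × String)) (out : List (Int × String)) : Prop := out = front_fill_gaps_alt data
instance (data : List (Int × String)) (out : List (Int × String)) : Decidable (Spec_front_fill_gaps data out) := by unfold Spec_front_fill_gaps; infer_instance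

-- ===== CLAIM (what is proved, stated in full; the proofs are below) =====
def Claim_equal_front_fill_gaps : Prop := ∀ (data : List (Int × String)), Dom_front_fill_gaps data → Spec_front_fill_gaps data (front_fill_gaps data)

-- ===== LEMMAS AND PROOFS =====

-- last entry of a nonempty list, carried structurally
def lastKV (p : Int × String) : List (Int × String) → Int × String
  | [] => p
  | q :: r => lastKV q r

-- the common shape both programs compute: fill [kᵢ, kᵢ₊₁) with vᵢ, last key alone
def fillSegs : List (Int × String) → List (Int × String)
  | [] => []
  | (k, v) :: rest =>
    match rest with
    | [] => [(k, v)]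
    | (k2, _) :: _ => (PySem.List.pyRange k k2 1).map (fun j => (j, v)) ++ fillSegs rest

theorem getLast?_eq_lastKV (p : Int × String) (rest : List (Int × String)) :
    (p :: rest).getLast? = some (lastKV p rest) := by
  induction rest generalizing p with
  | nil => rfl
  | cons q r ih => rw [List.getLast?_cons_cons, ih q, lastKV]

theorem lastKV_mem (p : Int × String) (rest : List (Int × String)) :
    lastKV p rest ∈ p :: rest := by
  induction rest generalizing p with
  | nil => simp [lastKV]
  | cons q r ih => rw [lastKV]; exact List.mem_cons_of_mem _ (ih q)

theorem le_lastKV_fst (p : Int × String) (rest : List (Int × String))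
    (hpw : ((p :: rest).map Prod.fst).Pairwise (· < ·)) :
    ∀ q ∈ p :: rest, q.1 ≤ (lastKV p rest).1 := by
  induction rest generalizing p with
  | nil => intro q hq; simp at hq; simp [hq, lastKV]
  | cons q r ih =>
    intro x hx
    rw [List.map_cons, List.pairwise_cons] at hpw
    rcases List.mem_cons.mp hx with rfl | hx'
    · have h1 : x.1 < q.1 := hpw.1 q.1 (by simp)
      have h2 := ih q hpw.2 q (List.mem_cons_self)
      rw [lastKV]; omega
    · exact (ih q hpw.2 x hx').trans_eq (by rw [lastKV])

-- B's fold produces fillSegs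
theorem B_fold_eq (p : Int × String) (rest acc : List (Int × String)) :
    (((p :: rest).zip rest).foldl
      (fun (acc : List (Int × String)) pq =>
        (PySem.List.pyRange pq.1.1 pq.2.1 1).foldl (fun a j => a ++ [(j, pq.1.2)]) acc) acc)
      ++ [lastKV p rest] = acc ++ fillSegs (p :: rest) := by
  induction rest generalizing p acc with
  | nil => simp [lastKV, fillSegs]
  | cons q r ih =>
    obtain ⟨k, v⟩ := p
    obtain ⟨k2, v2⟩ := q
    rw [List.zip_cons_cons, List.foldl_cons, lastKV, fillSegs]
    rw [ih (k2, v2)]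
    rw [PySem.List.foldl_append_singleton_eq_map]
    simp [List.append_assoc]

-- a run of keys absent from d leaves prev fixed and appends (j, v)
theorem A_fold_nokey (d : PySem.Dict Int String) (l : List Int) (v : String)
    (acc : List (Int × String)) (hno : ∀ j ∈ l, d.contains j = false) :
    l.foldl
      (fun (st : Option String × List (Int × String)) key =>
        let prev := if d.contains key then d.get? key else st.1
        (prev, st.2 ++ [(key, prev.getD "")]))
      (some v, acc)
    = (some v, acc ++ l.map (fun j => (j, v))) := by
  induction l generalizing acc with
  | nil => simp
  | cons j l ih =>
    rw [List.foldl_cons, List.map_cons]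
    simp only [hno j (List.mem_cons_self), Bool.false_eq_true, if_false, Option.getD_some]
    rw [ih _ (fun x hx => hno x (List.mem_cons_of_mem _ hx))]
    simp [List.append_assoc]

-- A's scan over [k, last+1) produces fillSegs, for any strictly key-sorted
-- segment list agreeing with d
theorem A_fold_eq (d : PySem.Dict Int String) (hnd : d.keys.Nodup) :
    ∀ (rest : List (Int × String)) (k : Int) (v : String) (prev0 : Option String)
      (acc : List (Int × String)),
      (((k, v) :: rest).map Prod.fst).Pairwise (· < ·) →
      (∀ p ∈ (k, v) :: rest, p ∈ d.items) →
      (∀ x : Int, k ≤ x → (d.contains x = true ↔ x ∈ ((k, v) :: rest).map Prod.fst)) →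
      (PySem.List.pyRange k ((lastKV (k, v) rest).1 + 1) 1).foldl
        (fun (st : Option String × List (Int × String)) key =>
          let prev := if d.contains key then d.get? key else st.1
          (prev, st.2 ++ [(key, prev.getD "")]))
        (prev0, acc)
      = (some (lastKV (k, v) rest).2, acc ++ fillSegs ((k, v) :: rest)) := by
  intro rest
  induction rest with
  | nil =>
    intro k v prev0 acc _ hmem hcont
    have hck : d.contains k = true := (hcont k le_rfl).mpr (by simp)
    have hgk : d.get? k = some v := by
      have : ((k, v) : Int × String) ∈ d.items := hmem (k, v) (by simp)
      exact PySem.Dict.get?_of_mem_items d this hnd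
    rw [lastKV, PySem.List.pyRange_one_singleton, List.foldl_cons, List.foldl_nil]
    simp [hck, hgk, fillSegs]
  | cons q r ih =>
    intro k v prev0 acc hpw hmem hcont
    obtain ⟨k2, v2⟩ := q
    have hpw' := hpw
    rw [List.map_cons, List.pairwise_cons] at hpw'
    have hkk2 : k < k2 := hpw'.1 k2 (by simp)
    have hk2lt : ∀ y ∈ r.map Prod.fst, k2 < y := by
      have h2 := hpw'.2
      rw [List.map_cons, List.pairwise_cons] at h2
      exact h2.1
    have hk2last : k2 ≤ (lastKV (k2, v2) r).1 :=
      le_lastKV_fst (k2, v2) r hpw'.2 (k2, v2) (List.mem_cons_self)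
    have hlast : lastKV (k, v) ((k2, v2) :: r) = lastKV (k2, v2) r := rfl
    rw [hlast]
    rw [PySem.List.pyRange_one_append k k2 ((lastKV (k2, v2) r).1 + 1)
        (le_of_lt hkk2) (by omega)]
    rw [List.foldl_append]
    rw [PySem.List.pyRange_one_cons hkk2, List.foldl_cons]
    have hck : d.contains k = true := (hcont k le_rfl).mpr (by simp)
    have hgk : d.get? k = some v := by
      have hmm : ((k, v) : Int × String) ∈ d.items := hmem (k, v) (by simp)
      exact PySem.Dict.get?_of_mem_items d hmm hnd
    simp only [hck, if_true, hgk, Option.getD_some]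
    rw [A_fold_nokey d _ v _ (by
      intro j hj
      rw [PySem.List.mem_pyRange_one] at hj
      cases hc : d.contains j with
      | false => rfl
      | true =>
        exfalso
        have hj' := (hcont j (by omega)).mp hc
        simp only [List.map_cons, List.mem_cons] at hj'
        rcases hj' with rfl | rfl | hj''
        · omega
        · omega
        · exact absurd (hk2lt j hj'') (by omega))]
    rw [ih k2 v2 (some v) _ hpw'.2
      (fun p hp => hmem p (List.mem_cons_of_mem _ hp))
      (by
        intro x hx
        rw [hcont x (by omega), List.map_cons, List.mem_cons]
        constructor
        · rintro (rfl | h)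
          · omega
          · exact h
        · intro h
          exact Or.inr h)]
    rw [fillSegs, PySem.List.pyRange_one_cons hkk2, List.map_cons]
    simp [List.append_assoc]

-- ===== VERDICT =====
theorem front_fill_gaps_spec : Claim_equal_front_fill_gaps := by
  intro data _
  unfold Spec_front_fill_gaps front_fill_gaps front_fill_gaps_alt
  set d := PySem.Dict.ofList data with hd
  have hnd : d.keys.Nodup := PySem.Dict.nodup_keys_ofList data
  cases hitems : PySem.List.sorted d.items (fun kv => kv.1) false with
  | nil =>
    have hne : d.items = [] := by
      have := PySem.List.sorted_eq_nil_iff (xs := d.items) (key := fun kv => kv.1) (rev := false)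
      exact this.mp hitems
    simp [hne]
  | cons p rest =>
    obtain ⟨k1, v1⟩ := p
    have hperm : ((k1, v1) :: rest).Perm d.items := by
      rw [← hitems]; exact PySem.List.sorted_perm _ _ _
    have hne : ¬ d.items = [] := by
      intro h
      rw [h] at hperm
      exact absurd hperm.length_eq (by simp)
    have hkeys : d.keys = d.items.map Prod.fst := rfl
    have hkperm : (((k1, v1) :: rest).map Prod.fst).Perm d.keys := by
      rw [hkeys]; exact hperm.map Prod.fst
    have hndk : (((k1, v1) :: rest).map Prod.fst).Nodup := hkperm.nodup_iff.mpr hnd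
    have hple : ((k1, v1) :: rest).Pairwise (fun a b => a.1 ≤ b.1) := by
      rw [← hitems]; exact PySem.List.sorted_pairwise _ _
    have hpw : (((k1, v1) :: rest).map Prod.fst).Pairwise (· < ·) := by
      have h1 : (((k1, v1) :: rest).map Prod.fst).Pairwise (· ≤ ·) :=
        List.pairwise_map.mpr hple
      have h2 : (((k1, v1) :: rest).map Prod.fst).Pairwise (· ≠ ·) :=
        List.nodup_iff_pairwise_ne.mp hndk
      exact (h1.and h2).imp (fun h => lt_of_le_of_ne h.1 h.2)
    have hcont : ∀ x : Int, d.contains x = true ↔ x ∈ ((k1, v1) :: rest).map Prod.fst := by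
      intro x
      rw [PySem.Dict.contains_iff_mem_keys]
      exact (hkperm.mem_iff).symm
    have hmem : ∀ p ∈ (k1, v1) :: rest, p ∈ d.items := fun p hp => hperm.subset hp
    -- min(data.keys()) is the head key of the sorted items
    have hmin : PySem.List.min? d.keys (fun x => x) = some k1 := by
      cases hm : PySem.List.min? d.keys (fun x => x) with
      | none =>
        have : d.keys = [] := (PySem.List.min?_eq_none_iff _ _).mp hm
        have hk1 : (k1 : Int) ∈ d.keys := hkperm.subset (by simp)
        rw [this] at hk1
        exact absurd hk1 (List.not_mem_nil)
      | some m =>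
        have hmm : m ∈ d.keys := PySem.List.min?_mem hm
        have hmle : m ≤ k1 := PySem.List.min?_isMin hm k1 (hkperm.subset (by simp))
        have hk1le : k1 ≤ m := by
          rw [hkeys, List.mem_map] at hmm
          obtain ⟨q, hq, hq1⟩ := hmm
          have := PySem.List.key_head_sorted_le _ _ hitems q hq
          simpa [hq1] using this
        have : m = k1 := le_antisymm hmle hk1le
        rw [this]
    -- max(data.keys()) is the last key of the sorted items
    have hmax : PySem.List.max? d.keys (fun x => x) = some (lastKV (k1, v1) rest).1 := by
      cases hm : PySem.List.max? d.keys (fun x => x) with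
      | none =>
        have : d.keys = [] := (PySem.List.max?_eq_none_iff _ _).mp hm
        have hk1 : (k1 : Int) ∈ d.keys := hkperm.subset (by simp)
        rw [this] at hk1
        exact absurd hk1 (List.not_mem_nil)
      | some m =>
        have hmm : m ∈ d.keys := PySem.List.max?_mem hm
        have hlmem : (lastKV (k1, v1) rest).1 ∈ d.keys := by
          apply hkperm.subset
          exact List.mem_map_of_mem (lastKV_mem (k1, v1) rest)
        have h1 : (lastKV (k1, v1) rest).1 ≤ m := PySem.List.max?_isMax hm _ hlmem
        have h2 : m ≤ (lastKV (k1, v1) rest).1 := by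
          rw [hkeys, List.mem_map] at hmm
          obtain ⟨q, hq, hq1⟩ := hmm
          have := le_lastKV_fst (k1, v1) rest hpw q (hperm.mem_iff.mpr hq)
          omega
        have : m = (lastKV (k1, v1) rest).1 := le_antisymm h2 h1
        rw [this]
    rw [if_neg hne, hmin, hmax]
    simp only [Option.getD_some]
    rw [A_fold_eq d hnd rest k1 v1 none [] hpw hmem (fun x _ => hcont x)]
    rw [List.drop_one, List.tail_cons, getLast?_eq_lastKV]
    exact (B_fold_eq (k1, v1) rest []).symm
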